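-- pv_equiv track=rewrite | github.com/wkabbani/advent-of-code | day-16/main.py | get_my_ticket
-- ===== SOURCE A (Python) =====
-- def get_my_ticket(data):
--     found = False
--     my_ticket = []
--     for line in data:
--         if not found and line.startswith('your ticket'):
--             found = True
--             continue
--         if found:
--             my_ticket = [int(value) for value in line.split(',')]
--             break
--     return my_ticket
-- ===== SOURCE B (Python) =====
-- def get_my_ticket(data):
--     marks = [i for i, line in enumerate(data) if line.startswith('your ticket')]
--     after = data[marks[0] + 1 : marks[0] + 2] if marks else []
--     return [int(v) for v in after[0].split(',')] if after else []
-- ===== Notes on version B (the rewrite author's own statement) =====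
-- stated objective: alternative
-- what changed: Replaces A's single stateful scan (found-flag + break) with staged passes: first build the full list of marker indices with an enumerate-filter comprehension, then slice out the line after the first marker and parse it.
import Mathlib
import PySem

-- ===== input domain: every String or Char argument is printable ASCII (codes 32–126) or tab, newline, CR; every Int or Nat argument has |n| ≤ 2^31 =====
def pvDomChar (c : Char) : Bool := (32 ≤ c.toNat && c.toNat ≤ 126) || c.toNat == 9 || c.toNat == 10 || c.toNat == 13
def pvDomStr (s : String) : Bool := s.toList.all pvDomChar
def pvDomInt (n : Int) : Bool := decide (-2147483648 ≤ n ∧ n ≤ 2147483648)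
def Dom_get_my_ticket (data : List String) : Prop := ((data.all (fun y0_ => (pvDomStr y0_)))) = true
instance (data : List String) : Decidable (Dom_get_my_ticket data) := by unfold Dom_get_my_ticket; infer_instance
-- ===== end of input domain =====

-- B replaces A's stateful scan (found flag + break) with staged passes: an enumerate-filter comprehension collecting all marker indices, then a slice of the line after the first one (alternative decomposition; same cost).


-- ===== PORT A =====
-- [int(value) for value in line.split(',')]; the getD 0 is unreachable inside Pre_ (int() raising is excluded there)
def pvParseTicket (line : String) : List Int :=
  ((PySem.Str.split? line ",").getD []).map (fun v => (PySem.Int.ofStr? v).getD 0)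

-- the for-loop with its 'found' flag and 'my_ticket' accumulator, as structural recursion over the same state
def pvGoA (found : Bool) (my_ticket : List Int) : List String → List Int
  | [] => my_ticket
  | line :: rest =>
      if !found && PySem.Str.startswith line "your ticket" then
        pvGoA true my_ticket rest
      else if found then
        pvParseTicket line
      else
        pvGoA found my_ticket rest

def get_my_ticket (data : List String) : List Int := pvGoA false [] data

-- ===== PORT B =====
-- the comprehension '[i for i, line in enumerate(data) if line.startswith(...)]'
def pvMarks (data : List String) : List Int :=
  (PySem.List.enumerate data 0).filterMap
    (fun p => if PySem.Str.startswith p.2 "your ticket" then some p.1 else none)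

def get_my_ticket_alt (data : List String) : List Int :=
  let after : List String :=
    match pvMarks data with
    | [] => []
    | i :: _ => PySem.List.slice data (some (i + 1)) (some (i + 2))
  match after with
  | [] => []
  | nxt :: _ => pvParseTicket nxt

-- ===== PRECONDITION & SPEC =====
-- Pre_ excludes exactly the inputs where Python A raises ValueError: a line follows the first
-- 'your ticket' marker and some comma-separated field of it is not a valid int literal.
def Pre_get_my_ticket (data : List String) : Prop :=
  ((((data.dropWhile (fun l => !PySem.Str.startswith l "your ticket")).drop 1).take 1).all
    (fun nxt => ((PySem.Str.split? nxt ",").getD []).all (fun v => (PySem.Int.ofStr? v).isSome))) = true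
instance (data : List String) : Decidable (Pre_get_my_ticket data) := by unfold Pre_get_my_ticket; infer_instance

def pvWitness_get_my_ticket : List String := ["nearby tickets:", "your ticket:", "7,1,14"]

def Spec_get_my_ticket (data : List String) (out : List Int) : Prop := out = get_my_ticket_alt data
instance (data : List String) (out : List Int) : Decidable (Spec_get_my_ticket data out) := by unfold Spec_get_my_ticket; infer_instance

-- ===== CLAIM (what is proved, stated in full; the proofs are below) =====
def Claim_equal_get_my_ticket : Prop := ∀ (data : List String), Dom_get_my_ticket data → Pre_get_my_ticket data → Spec_get_my_ticket data (get_my_ticket data)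

-- ===== LEMMAS AND PROOFS =====
-- marker positions as plain Nats, for the induction
def pvMarksNat : List String → List Nat
  | [] => []
  | line :: rest =>
      if PySem.Str.startswith line "your ticket" then
        0 :: (pvMarksNat rest).map (fun x => x + 1)
      else
        (pvMarksNat rest).map (fun x => x + 1)

theorem pvMarks_from (xs : List String) : ∀ s : Int,
    (PySem.List.enumerate xs s).filterMap
      (fun p => if PySem.Str.startswith p.2 "your ticket" then some p.1 else none)
    = (pvMarksNat xs).map (fun (k : Nat) => s + (k : Int)) := by
  induction xs with
  | nil => intro s; rfl
  | cons line rest ih =>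
    intro s
    rw [PySem.List.enumerate_cons]
    by_cases h : PySem.Str.startswith line "your ticket" = true
    · simp only [List.filterMap_cons, if_pos h, pvMarksNat, ih (s + 1), List.map_cons,
        List.map_map]
      refine congrArg₂ _ (by omega) ?_
      apply List.map_congr_left; intro k _
      simp only [Function.comp_apply]; push_cast; ring
    · simp only [List.filterMap_cons, if_neg h, pvMarksNat, ih (s + 1), List.map_map]
      apply List.map_congr_left; intro k _
      simp only [Function.comp_apply]; push_cast; ring

theorem pvMarks_eq (xs : List String) : pvMarks xs = (pvMarksNat xs).map (fun (k : Nat) => (k : Int)) := by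
  rw [pvMarks, pvMarks_from xs 0]
  apply List.map_congr_left; intro k _; omega

-- B's body, with pvMarks data exposed as the scrutinee
theorem alt_eq (data : List String) : get_my_ticket_alt data =
    match pvMarks data with
    | [] => []
    | i :: _ =>
        match PySem.List.slice data (some (i + 1)) (some (i + 2)) with
        | [] => []
        | nxt :: _ => pvParseTicket nxt := by
  unfold get_my_ticket_alt
  cases pvMarks data with
  | nil => rfl
  | cons i t => cases PySem.List.slice data (some (i + 1)) (some (i + 2)) <;> rfl

theorem pvGoA_eq_alt : ∀ (data : List String), pvGoA false [] data = get_my_ticket_alt data := by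
  intro data
  induction data with
  | nil => rfl
  | cons line rest ih =>
    by_cases h : PySem.Str.startswith line "your ticket" = true
    · -- marker line: A switches the flag; B's first mark is 0, after = (line::rest)[1:2] = rest.take 1
      simp only [pvGoA, h, Bool.not_false, Bool.and_true, if_pos]
      have hm : pvMarks (line :: rest)
          = 0 :: ((pvMarksNat rest).map (fun x => x + 1)).map (fun (k : Nat) => (k : Int)) := by
        rw [pvMarks_eq, pvMarksNat, if_pos h, List.map_cons]; rfl
      have hs : PySem.List.slice (line :: rest) (some ((0:Int) + 1)) (some ((0:Int) + 2))
          = rest.take 1 := by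
        have hx := PySem.List.slice_natCast (xs := line :: rest) (a := 1) (b := 2)
        simpa using hx
      rw [alt_eq]
      simp only [hm, hs]
      cases rest with
      | nil => rfl
      | cons nxt rest' => simp [pvGoA, List.take]
    · -- non-marker line: A recurses; B's marks all shift by one, slices agree on the tail
      simp only [pvGoA, h, Bool.false_eq_true, if_neg, Bool.and_false, not_false_iff]
      rw [ih, alt_eq, alt_eq]
      have hm : pvMarks (line :: rest)
          = ((pvMarksNat rest).map (fun x => x + 1)).map (fun (k : Nat) => (k : Int)) := by
        rw [pvMarks_eq, pvMarksNat, if_neg h]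
      rw [hm, pvMarks_eq]
      cases hr : pvMarksNat rest with
      | nil => rfl
      | cons k ks =>
        simp only [List.map_cons]
        have h1 : PySem.List.slice (line :: rest) (some (((k + 1 : Nat) : Int) + 1)) (some (((k + 1 : Nat) : Int) + 2))
            = (rest.drop (k + 1)).take 1 := by
          have hx := PySem.List.slice_natCast (xs := line :: rest) (a := k + 2) (b := k + 3)
          have e1 : (((k + 1 : Nat) : Int) + 1) = ((k + 2 : Nat) : Int) := by push_cast; ring
          have e2 : (((k + 1 : Nat) : Int) + 2) = ((k + 3 : Nat) : Int) := by push_cast; ring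
          rw [e1, e2, hx, List.drop_succ_cons]
          congr 1
          omega
        have h2 : PySem.List.slice rest (some (((k : Nat) : Int) + 1)) (some (((k : Nat) : Int) + 2))
            = (rest.drop (k + 1)).take 1 := by
          have hx := PySem.List.slice_natCast (xs := rest) (a := k + 1) (b := k + 2)
          have e1 : (((k : Nat) : Int) + 1) = ((k + 1 : Nat) : Int) := by push_cast; ring
          have e2 : (((k : Nat) : Int) + 2) = ((k + 2 : Nat) : Int) := by push_cast; ring
          rw [e1, e2, hx]
          congr 1
          omega
        rw [h1, h2]

-- ===== VERDICT (by name: the statement is the Claim_ definition above) =====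
theorem get_my_ticket_spec : Claim_equal_get_my_ticket := by
  intro data _ _
  unfold Spec_get_my_ticket get_my_ticket
  exact pvGoA_eq_alt data
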